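-- pv_equiv track=rewrite | github.com/satishkumard/Python | Code/patterns2.py | hollow_box
-- ===== SOURCE A (Python) =====
-- def hollow_box(n):
--     """first and last with N stars, others with star in first and Nth column"""
--     stars = ''
--     for i in range(n):
--         stars = stars + '*'
--         for j in range(n):
--             if i == 0 or i == n-1 or j == n-1:
--                 stars = stars + '*'
--             else:
--                 stars = stars + ' '
--         stars = stars + "\n"
--     return stars
-- ===== SOURCE B (Python) =====
-- def hollow_box(n):
--     """first and last with N stars, others with star in first and Nth column"""
--     if n <= 0:
--         return ''
--     grid = [[' '] * (n + 1) for _ in range(n)]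
--     grid[0] = ['*'] * (n + 1)
--     grid[n - 1] = ['*'] * (n + 1)
--     for row in grid:
--         row[0] = '*'
--         row[n] = '*'
--     return ''.join(''.join(row) + '\n' for row in grid)
-- ===== Notes on version B (the rewrite author's own statement) =====
-- stated objective: alternative
-- what changed: B replaces A's per-character nested-loop conditional with repeated string concatenation by a mutable character grid: rows initialized to spaces, top/bottom rows and the two border columns stamped in bulk, then joined once into the output string.
import Mathlib
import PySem

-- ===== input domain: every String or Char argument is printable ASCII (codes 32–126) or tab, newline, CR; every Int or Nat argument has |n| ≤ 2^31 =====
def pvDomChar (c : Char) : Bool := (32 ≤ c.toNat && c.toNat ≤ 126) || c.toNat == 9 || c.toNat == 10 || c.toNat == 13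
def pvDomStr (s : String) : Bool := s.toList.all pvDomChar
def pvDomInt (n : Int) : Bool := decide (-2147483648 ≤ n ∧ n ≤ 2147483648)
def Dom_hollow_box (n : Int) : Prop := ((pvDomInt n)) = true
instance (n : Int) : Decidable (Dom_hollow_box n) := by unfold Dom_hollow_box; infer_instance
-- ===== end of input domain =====

-- B replaces A's per-character nested-loop conditional and repeated string concatenation by a
-- space grid whose borders are stamped in bulk and then joined once; same output, alternative
-- decomposition.

-- ===== PORT A =====
def hollow_box (n : Int) : String :=
  (PySem.List.pyRange 0 n 1).foldl (fun stars i =>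
    let stars := stars ++ "*"
    let stars := (PySem.List.pyRange 0 n 1).foldl (fun stars j =>
      if i == 0 || i == n - 1 || j == n - 1 then stars ++ "*" else stars ++ " ") stars
    stars ++ "\n") ""

-- ===== PORT B =====
def hollow_box_alt (n : Int) : String :=
  if n ≤ 0 then "" else
  let grid : List (List String) :=
    (List.range n.toNat).map (fun _ => PySem.List.pyRepeat [" "] (n + 1))
  let grid := grid.set 0 (PySem.List.pyRepeat ["*"] (n + 1))
  let grid := grid.set (n - 1).toNat (PySem.List.pyRepeat ["*"] (n + 1))
  let grid := grid.map (fun row => (row.set 0 "*").set n.toNat "*")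
  PySem.Str.join "" (grid.map (fun row => PySem.Str.join "" row ++ "\n"))

-- ===== PRECONDITION & SPEC =====
def Spec_hollow_box (n : Int) (out : String) : Prop := out = hollow_box_alt n
instance (n : Int) (out : String) : Decidable (Spec_hollow_box n out) := by unfold Spec_hollow_box; infer_instance

-- ===== CLAIM (what is proved, stated in full; the proofs are below) =====
def Claim_equal_hollow_box : Prop := ∀ (n : Int), Dom_hollow_box n → Spec_hollow_box n (hollow_box n)

-- ===== LEMMAS AND PROOFS =====

-- a string-accumulating loop appends the concatenation of its pieces
theorem strFoldl {α : Type} (g : α → String) (l : List α) (init : String) :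
    l.foldl (fun s x => s ++ g x) init
      = init ++ String.ofList ((l.map (fun x => (g x).toList)).flatten) := by
  induction l generalizing init with
  | nil => apply String.toList_inj.mp; simp
  | cons a t ih => rw [List.foldl_cons, ih]; apply String.toList_inj.mp; simp

theorem join_nil_eq_flatten (ls : List (List Char)) :
    PySem.Chars.join [] ls = ls.flatten := by
  induction ls with
  | nil => simp [PySem.Chars.join, List.intercalate]
  | cons a t ih =>
    cases t with
    | nil => simp [PySem.Chars.join, List.intercalate]
    | cons b t' => rw [PySem.Chars.join_cons_cons, ih]; simp

theorem set_replicate_self {α : Type} (k j : Nat) (a : α) :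
    (List.replicate k a).set j a = List.replicate k a := by
  apply List.ext_getElem
  · simp
  · intro i h1 h2; simp

theorem set_last_replicate {α : Type} (k : Nat) (a b : α) :
    (List.replicate (k + 1) a).set k b = List.replicate k a ++ [b] := by
  induction k with
  | zero => rfl
  | succ k ih => simpa [List.replicate_succ] using ih

theorem flatten_map_single {α : Type} (h : α → Char) (l : List α) :
    (l.map (fun x => [h x])).flatten = l.map h := by
  have hm : List.map (fun c : Char => [c]) (List.map h l) = List.map (fun x => [h x]) l := by
    rw [List.map_map]; rfl
  rw [← join_nil_eq_flatten, ← hm, PySem.Chars.join_nil_singletons]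

-- characterisation of A: the whole output is the concatenation of the row strings
theorem hollow_box_eq (n : Int) :
    hollow_box n = String.ofList (((PySem.List.pyRange 0 n 1).map (fun i =>
      '*' :: ((PySem.List.pyRange 0 n 1).map (fun j =>
        if i == 0 || i == n - 1 || j == n - 1 then '*' else ' ')) ++ ['\n'])).flatten) := by
  unfold hollow_box
  have hinner : ∀ (i : Int) (s : String),
      (PySem.List.pyRange 0 n 1).foldl (fun stars j =>
        if i == 0 || i == n - 1 || j == n - 1 then stars ++ "*" else stars ++ " ") s
      = s ++ String.ofList ((PySem.List.pyRange 0 n 1).map (fun j =>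
          if i == 0 || i == n - 1 || j == n - 1 then '*' else ' ')) := by
    intro i s
    rw [PySem.List.foldl_congr_mem _ _
      (fun stars j => stars ++ (if i == 0 || i == n - 1 || j == n - 1 then "*" else " "))
      _ (by intro acc x _; split <;> simp_all)]
    rw [strFoldl]
    congr 1
    apply String.toList_inj.mp
    simp only [String.toList_ofList]
    have hf : (fun j => (if i == 0 || i == n - 1 || j == n - 1 then "*" else " ").toList)
        = fun j : Int => [if i == 0 || i == n - 1 || j == n - 1 then '*' else ' '] := by
      funext j; split <;> rfl
    rw [hf, flatten_map_single]
  rw [PySem.List.foldl_congr_mem _ _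
    (fun stars i => stars ++ String.ofList ('*' :: ((PySem.List.pyRange 0 n 1).map (fun j =>
        if i == 0 || i == n - 1 || j == n - 1 then '*' else ' ')) ++ ['\n']))
    _ ?_]
  · rw [strFoldl]
    apply String.toList_inj.mp
    simp
  · intro acc x _
    simp only [hinner]
    apply String.toList_inj.mp
    simp

-- characterisation of B: each stamped row, as its character list
theorem hollow_box_alt_eq (m : Nat) (hm : 1 ≤ m) :
    hollow_box_alt (m : Int) = String.ofList (((List.range m).map (fun i =>
      if i = 0 ∨ i = m - 1 then List.replicate (m + 1) '*' ++ ['\n']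
      else '*' :: (List.replicate (m - 1) ' ' ++ ['*', '\n']))).flatten) := by
  unfold hollow_box_alt
  rw [if_neg (by omega)]
  simp only [PySem.List.pyRepeat_singleton]
  have h1 : ((m : Int) + 1).toNat = m + 1 := by omega
  have h2 : ((m : Int) - 1).toNat = m - 1 := by omega
  have h3 : (m : Int).toNat = m := by omega
  rw [h1, h2, h3]
  have hgrid : ((((List.range m).map (fun _ => List.replicate (m + 1) " ")).set 0
        (List.replicate (m + 1) "*")).set (m - 1) (List.replicate (m + 1) "*"))
      = (List.range m).map (fun i =>
        if i = 0 ∨ i = m - 1 then List.replicate (m + 1) "*" else List.replicate (m + 1) " ") := by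
    apply List.ext_getElem
    · simp
    · intro i hi1 hi2
      simp only [List.getElem_set, List.getElem_map, List.getElem_range]
      split_ifs <;> (simp_all; try omega)
  rw [hgrid]
  apply String.toList_inj.mp
  simp only [String.toList_ofList, List.map_map]
  have hemp : "".toList = ([] : List Char) := rfl
  simp only [PySem.Str.toList_join, List.map_map]
  rw [hemp, join_nil_eq_flatten]
  apply congrArg List.flatten
  apply List.map_congr_left
  intro i hi
  have hi' := List.mem_range.mp hi
  simp only [Function.comp_apply, String.toList_append, PySem.Str.toList_join]
  rw [hemp, join_nil_eq_flatten]
  have hnl : "\n".toList = ['\n'] := rfl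
  rw [hnl]
  by_cases hb : i = 0 ∨ i = m - 1
  · rw [if_pos hb, if_pos hb, set_replicate_self, set_replicate_self]
    have hmap : List.map String.toList (List.replicate (m + 1) "*")
        = List.map (fun c => [c]) (List.replicate (m + 1) '*') := by simp
    rw [hmap, ← join_nil_eq_flatten, PySem.Chars.join_nil_singletons]
  · rw [if_neg hb, if_neg hb]
    obtain ⟨k, rfl⟩ : ∃ k, m = k + 1 := ⟨m - 1, by omega⟩
    simp only [Nat.add_sub_cancel]
    have hrow : ((List.replicate (k + 1 + 1) " ").set 0 "*").set (k + 1) "*"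
        = "*" :: (List.replicate k " " ++ ["*"]) := by
      rw [List.replicate_succ, List.set_cons_zero, List.set_cons_succ, set_last_replicate]
    rw [hrow]
    have hmap : List.map String.toList ("*" :: (List.replicate k " " ++ ["*"]))
        = List.map (fun c => [c]) ('*' :: (List.replicate k ' ' ++ ['*'])) := by simp
    rw [hmap, ← join_nil_eq_flatten, PySem.Chars.join_nil_singletons]
    simp

theorem rowA_eq (m i : Nat) (hm : 1 ≤ m) (hi : i < m) :
    '*' :: ((List.range m).map (fun j : Nat =>
        if (i : Int) == 0 || (i : Int) == (m : Int) - 1 || (j : Int) == (m : Int) - 1 then '*' else ' ')) ++ ['\n']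
      = (if i = 0 ∨ i = m - 1 then List.replicate (m + 1) '*' ++ ['\n']
         else '*' :: (List.replicate (m - 1) ' ' ++ ['*', '\n'])) := by
  by_cases hb : i = 0 ∨ i = m - 1
  · rw [if_pos hb]
    have hc : ∀ j ∈ List.range m,
        (if (i : Int) == 0 || (i : Int) == (m : Int) - 1 || (j : Int) == (m : Int) - 1 then '*' else ' ') = '*' := by
      intro j _
      have hcond : ((i : Int) == 0 || (i : Int) == (m : Int) - 1 || (j : Int) == (m : Int) - 1) = true := by
        simp only [Bool.or_eq_true, beq_iff_eq]
        omega
      rw [hcond]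
      rfl
    rw [List.map_congr_left hc, List.map_const', List.length_range, List.replicate_succ]
  · rw [if_neg hb]
    obtain ⟨hb1, hb2⟩ := not_or.mp hb
    have hsplit : List.range m = List.range (m - 1) ++ [m - 1] := by
      conv_lhs => rw [show m = (m - 1) + 1 by omega]
      rw [List.range_succ]
    rw [hsplit, List.map_append]
    have hc : ∀ j ∈ List.range (m - 1),
        (if (i : Int) == 0 || (i : Int) == (m : Int) - 1 || (j : Int) == (m : Int) - 1 then '*' else ' ') = ' ' := by
      intro j hj
      have hj' := List.mem_range.mp hj
      have hcond : ((i : Int) == 0 || (i : Int) == (m : Int) - 1 || (j : Int) == (m : Int) - 1) = false := by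
        simp only [Bool.or_eq_false_iff, beq_eq_false_iff_ne, ne_eq]
        refine ⟨⟨?_, ?_⟩, ?_⟩ <;> intro h <;> omega
      rw [hcond]
      rfl
    rw [List.map_congr_left hc, List.map_const', List.length_range]
    have hlast : (if (i : Int) == 0 || (i : Int) == (m : Int) - 1 || ((m - 1 : Nat) : Int) == (m : Int) - 1 then '*' else ' ') = '*' := by
      have h3 : ((m - 1 : Nat) : Int) = (m : Int) - 1 := by omega
      simp [h3]
    simp only [List.map_cons, List.map_nil]
    rw [hlast]
    simp

-- ===== VERDICT (by name: the statement is the Claim_ definition above) =====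
theorem hollow_box_spec : Claim_equal_hollow_box := by
  intro n _
  unfold Spec_hollow_box
  by_cases hn : n ≤ 0
  · rw [hollow_box_eq, PySem.List.pyRange_one_eq_nil hn]
    unfold hollow_box_alt
    rw [if_pos hn]
    rfl
  · obtain ⟨m, rfl⟩ : ∃ m : Nat, n = (m : Int) := ⟨n.toNat, by omega⟩
    have hm : 1 ≤ m := by omega
    rw [hollow_box_eq, hollow_box_alt_eq m hm]
    congr 1
    rw [PySem.List.pyRange_zero_natCast, List.map_map]
    apply congrArg List.flatten
    apply List.map_congr_left
    intro i hi
    simp only [Function.comp_apply, List.map_map, Function.comp_def]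
    exact rowA_eq m i hm (List.mem_range.mp hi)
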